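-- pv_equiv track=rewrite | github.com/iclue-summer-2020/quasi-key-tableaux | qkt-server/swaps.py | dom
-- ===== SOURCE A (Python) =====
-- def dom(ax, bx):
--   '''Returns whether or not `ax` dominates `bx` (<=).'''
--   assert len(ax) == len(bx), (len(ax), len(bx))
--   asum = 0
--   bsum = 0
--   for a, b in zip(ax, bx):
--     asum += a
--     bsum += b
--     if asum > bsum: return False
--   return True
-- ===== SOURCE B (Python) =====
-- def dom(ax, bx):
--   '''Returns whether or not `ax` dominates `bx` (<=).'''
--   assert len(ax) == len(bx), (len(ax), len(bx))
--   s = 0  # running suffix sum of bx - ax, scanned right-to-left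
--   m = 0  # maximum of s over the strict suffixes seen so far
--   for a, b in zip(reversed(ax), reversed(bx)):
--     if s > m:
--       m = s
--     s += b - a
--   return m <= s
-- ===== Notes on version B (the rewrite author's own statement) =====
-- stated objective: alternative
-- what changed: Replaced the left-to-right prefix-sum comparison with early return by a right-to-left scan that tracks the maximum suffix sum of bx-ax and compares it once against the total (prefix k condition rewritten as total minus suffix).
import Mathlib
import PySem

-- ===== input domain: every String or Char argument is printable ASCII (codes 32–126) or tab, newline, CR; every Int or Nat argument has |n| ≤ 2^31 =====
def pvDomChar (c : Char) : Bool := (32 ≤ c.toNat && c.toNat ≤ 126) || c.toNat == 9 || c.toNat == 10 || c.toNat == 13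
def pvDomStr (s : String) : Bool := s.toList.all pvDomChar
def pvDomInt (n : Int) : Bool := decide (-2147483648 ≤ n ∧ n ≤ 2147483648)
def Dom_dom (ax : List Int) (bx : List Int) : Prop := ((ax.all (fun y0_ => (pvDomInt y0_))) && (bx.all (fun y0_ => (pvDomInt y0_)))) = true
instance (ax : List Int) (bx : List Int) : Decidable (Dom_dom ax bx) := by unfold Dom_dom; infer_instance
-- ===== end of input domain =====

-- B scans right-to-left, tracking the maximum suffix sum of bx-ax and comparing it once
-- against the total, instead of A's left-to-right prefix-sum comparison with early return.

-- ===== PORT A =====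
-- A's loop over zip(ax, bx) with running sums asum, bsum and an early `return False`.
def domLoop (pairs : List (Int × Int)) (asum bsum : Int) : Bool :=
  match pairs with
  | [] => true
  | (a, b) :: rest =>
    let asum' := asum + a
    let bsum' := bsum + b
    if asum' > bsum' then false else domLoop rest asum' bsum'

def dom (ax : List Int) (bx : List Int) : Bool :=
  domLoop (List.zip ax bx) 0 0

-- ===== PORT B =====
-- B's loop over zip(reversed(ax), reversed(bx)) with suffix sum s and running maximum m.
def domAltLoop (pairs : List (Int × Int)) (s m : Int) : Int × Int :=
  match pairs with
  | [] => (s, m)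
  | (a, b) :: rest =>
    let m' := if s > m then s else m
    domAltLoop rest (s + (b - a)) m'

def dom_alt (ax : List Int) (bx : List Int) : Bool :=
  let r := domAltLoop (List.zip ax.reverse bx.reverse) 0 0
  decide (r.2 ≤ r.1)

-- ===== PRECONDITION & SPEC =====
-- Pre_ excludes length-mismatched inputs, on which A's assert raises AssertionError.
def Pre_dom (ax : List Int) (bx : List Int) : Prop := ax.length = bx.length
instance (ax : List Int) (bx : List Int) : Decidable (Pre_dom ax bx) := by unfold Pre_dom; infer_instance
def pvWitness_dom : List Int × List Int := ([1, 2, 3], [2, 2, 2])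

def Spec_dom (ax : List Int) (bx : List Int) (out : Bool) : Prop := out = dom_alt ax bx
instance (ax : List Int) (bx : List Int) (out : Bool) : Decidable (Spec_dom ax bx out) := by unfold Spec_dom; infer_instance

-- ===== CLAIM (what is proved, stated in full; the proofs are below) =====
def Claim_equal_dom : Prop := ∀ (ax : List Int) (bx : List Int), Dom_dom ax bx → Pre_dom ax bx → Spec_dom ax bx (dom ax bx)

-- ===== LEMMAS AND PROOFS =====

-- sum of the elementwise differences b - a of a pair list
def dsum (pairs : List (Int × Int)) : Int := (pairs.map (fun p => p.2 - p.1)).sum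

theorem dsum_nil : dsum [] = 0 := rfl

theorem dsum_cons (p : Int × Int) (rest : List (Int × Int)) :
    dsum (p :: rest) = (p.2 - p.1) + dsum rest := by
  simp [dsum]

theorem dsum_append (l₁ l₂ : List (Int × Int)) :
    dsum (l₁ ++ l₂) = dsum l₁ + dsum l₂ := by
  simp [dsum]

theorem dsum_reverse (l : List (Int × Int)) : dsum l.reverse = dsum l := by
  simp [dsum, List.map_reverse]

theorem dsum_take_add_drop (l : List (Int × Int)) (k : ℕ) :
    dsum (l.take k) + dsum (l.drop k) = dsum l := by
  rw [← dsum_append, List.take_append_drop]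

-- A's loop succeeds iff every nonempty prefix has nonnegative shifted difference sum.
theorem domLoop_iff (pairs : List (Int × Int)) (s t : Int) :
    domLoop pairs s t = true ↔
      ∀ k : ℕ, 1 ≤ k → k ≤ pairs.length → 0 ≤ (t - s) + dsum (pairs.take k) := by
  induction pairs generalizing s t with
  | nil =>
    simp [domLoop]
    intro k h1 h2; omega
  | cons p rest ih =>
    obtain ⟨a, b⟩ := p
    simp only [domLoop]
    by_cases h : s + a > t + b
    · simp only [if_pos h, List.length_cons]
      constructor
      · intro hfalse; exact absurd hfalse (by simp)
      · intro hall
        have h1 := hall 1 (by omega) (by omega)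
        simp [dsum_cons, dsum_nil] at h1
        omega
    · simp only [if_neg h]
      rw [ih]
      constructor
      · intro hall k h1 h2
        match k with
        | 1 => simp [dsum_cons, dsum_nil]; omega
        | (k' + 2) =>
          have := hall (k' + 1) (by omega) (by simpa using h2)
          simp [dsum_cons] at this ⊢
          omega
      · intro hall k h1 h2
        have := hall (k + 1) (by omega) (by simp; omega)
        simp [dsum_cons] at this ⊢
        omega

-- B's loop: final max ≤ final sum iff m ≤ s + total and every proper prefix sum ≤ total.
theorem domAltLoop_iff (pairs : List (Int × Int)) (s m : Int) :
    ((domAltLoop pairs s m).2 ≤ (domAltLoop pairs s m).1) ↔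
      (m ≤ s + dsum pairs ∧
        ∀ k : ℕ, k < pairs.length → s + dsum (pairs.take k) ≤ s + dsum pairs) := by
  induction pairs generalizing s m with
  | nil =>
    simp [domAltLoop, dsum_nil]
  | cons p rest ih =>
    obtain ⟨a, b⟩ := p
    simp only [domAltLoop]
    rw [ih]
    constructor
    · rintro ⟨hm, hall⟩
      refine ⟨?_, ?_⟩
      · by_cases h : s > m
        · simp [if_pos h] at hm; simp [dsum_cons]; omega
        · simp [if_neg h] at hm; simp [dsum_cons]; omega
      · intro k hk
        match k with
        | 0 =>
          have hsle : s ≤ s + (b - a) + dsum rest := by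
            by_cases h : s > m
            · simp [if_pos h] at hm; omega
            · simp [if_neg h] at hm; omega
          simp [dsum_cons, dsum_nil]; omega
        | (k' + 1) =>
          have := hall k' (by simpa using hk)
          simp [dsum_cons] at this ⊢
          omega
    · rintro ⟨hm, hall⟩
      have hs0 : s ≤ s + ((b - a) + dsum rest) := by
        have := hall 0 (by simp)
        simp [dsum_cons, dsum_nil] at this
        omega
      refine ⟨?_, ?_⟩
      · simp [dsum_cons] at hm
        split_ifs with h <;> omega
      · intro k hk
        have := hall (k + 1) (by simpa using Nat.succ_lt_succ hk)
        simp [dsum_cons] at this ⊢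
        omega

-- taking k from the reverse, summed = total minus the complementary front prefix sum.
theorem dsum_take_reverse (l : List (Int × Int)) (k : ℕ) :
    dsum (l.reverse.take k) = dsum l - dsum (l.take (l.length - k)) := by
  rw [List.take_reverse, dsum_reverse]
  have := dsum_take_add_drop l (l.length - k)
  omega

-- zipping the reverses = reversing the zip, for equal-length lists
theorem zip_append_singleton (l1 l2 : List Int) (a b : Int) (h : l1.length = l2.length) :
    List.zip (l1 ++ [a]) (l2 ++ [b]) = List.zip l1 l2 ++ [(a, b)] := by
  induction l1 generalizing l2 with
  | nil =>
    cases l2 with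
    | nil => simp
    | cons y ys => simp at h
  | cons x xs ih =>
    cases l2 with
    | nil => simp at h
    | cons y ys =>
      simp only [List.length_cons, Nat.add_right_cancel_iff] at h
      simp [ih ys h]

theorem zip_reverse (ax bx : List Int) (h : ax.length = bx.length) :
    List.zip ax.reverse bx.reverse = (List.zip ax bx).reverse := by
  induction ax generalizing bx with
  | nil => simp
  | cons a rest ih =>
    cases bx with
    | nil => simp at h
    | cons b bs =>
      simp only [List.length_cons, Nat.add_right_cancel_iff] at h
      simp only [List.reverse_cons]
      rw [zip_append_singleton _ _ _ _ (by simpa using h), ih bs h]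
      simp

theorem dom_eq_dom_alt (ax bx : List Int) (hlen : ax.length = bx.length) :
    dom ax bx = dom_alt ax bx := by
  rw [Bool.eq_iff_iff]
  unfold dom dom_alt
  rw [zip_reverse ax bx hlen]
  simp only [domLoop_iff, decide_eq_true_iff, domAltLoop_iff]
  generalize (List.zip ax bx) = pairs
  rw [List.length_reverse]
  constructor
  · intro h
    refine ⟨?_, ?_⟩
    · rcases Nat.eq_zero_or_pos pairs.length with h0 | h0
      · rw [List.eq_nil_of_length_eq_zero h0]; simp [dsum_nil]
      · have := h pairs.length h0 (le_refl _)
        rw [List.take_length] at this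
        rw [dsum_reverse]; omega
    · intro k hk
      rw [dsum_take_reverse, dsum_reverse]
      have := h (pairs.length - k) (by omega) (by omega)
      omega
  · rintro ⟨h0, h⟩ k hk1 hk2
    rw [dsum_reverse] at h0
    rcases Nat.lt_or_ge k pairs.length with hk | hk
    · have := h (pairs.length - k) (by omega)
      rw [dsum_take_reverse, dsum_reverse] at this
      have hkk : pairs.length - (pairs.length - k) = k := by omega
      rw [hkk] at this
      omega
    · have hkeq : k = pairs.length := by omega
      rw [hkeq, List.take_length]
      omega

-- ===== VERDICT (by name: the statement is the Claim_ definition above) =====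
theorem dom_spec : Claim_equal_dom := by
  intro ax bx _ hpre
  exact dom_eq_dom_alt ax bx hpre
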